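-- pv_equiv track=rewrite | github.com/KraszewskiK/AdventOfCode2024 | aoc/day15.py | scale_map
-- ===== SOURCE A (Python) =====
-- def scale_map(map_: list[str]) -> list[str]:
--     new_map = []
--     scale = 2
--     for row in map_:
--         new_map.append(row
--                        .replace("#", "#" * scale)
--                        .replace(".", "." * scale)
--                        .replace("O", "[]")
--                        .replace("@", "@.")
--                        )
--     return new_map
-- ===== SOURCE B (Python) =====
-- _TABLE = {'#': '##', '.': '..', 'O': '[]', '@': '@.'}
--
-- def scale_map(map_: list[str]) -> list[str]:
--     return ["".join(_TABLE.get(c, c) for c in row) for row in map_]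
-- ===== Notes on version B (the rewrite author's own statement) =====
-- stated objective: idiomatic
-- what changed: Replaced the four sequential str.replace scans per row by one table-driven character pass: each row is expanded in a single ''.join over a substitution dict.
import Mathlib
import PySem

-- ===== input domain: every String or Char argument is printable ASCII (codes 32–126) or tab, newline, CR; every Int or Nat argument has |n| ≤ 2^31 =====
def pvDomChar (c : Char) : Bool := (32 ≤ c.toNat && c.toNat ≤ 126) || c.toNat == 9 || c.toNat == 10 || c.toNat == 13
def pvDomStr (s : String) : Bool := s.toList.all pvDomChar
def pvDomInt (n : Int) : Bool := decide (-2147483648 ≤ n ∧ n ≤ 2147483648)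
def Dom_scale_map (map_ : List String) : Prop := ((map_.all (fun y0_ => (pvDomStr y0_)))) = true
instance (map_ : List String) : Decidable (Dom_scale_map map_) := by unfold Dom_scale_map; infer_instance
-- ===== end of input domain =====

-- B replaces A's four sequential str.replace scans per row by one table-driven character pass (idiomatic).

-- ===== PORT A =====
-- literal transliteration: append for each row the chained replaces ("#"*2 = "##", "."*2 = "..")
def scale_map (map_ : List String) : List String :=
  map_.foldl (fun new_map row =>
    new_map ++ [PySem.Str.replace (PySem.Str.replace (PySem.Str.replace (PySem.Str.replace
      row "#" "##") "." "..") "O" "[]") "@" "@."]) []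

-- ===== PORT B =====
-- the substitution table _TABLE
def pvTable : PySem.Dict Char String :=
  ⟨[('#', "##"), ('.', ".."), ('O', "[]"), ('@', "@.")]⟩

-- literal transliteration of Source B: per row, "".join(_TABLE.get(c, c) for c in row)
def scale_map_alt (map_ : List String) : List String :=
  map_.map (fun row =>
    PySem.Str.join "" (row.toList.map (fun c => pvTable.getD c (String.ofList [c]))))

-- ===== PRECONDITION & SPEC =====
def Spec_scale_map (map_ : List String) (out : List String) : Prop := out = scale_map_alt map_
instance (map_ : List String) (out : List String) : Decidable (Spec_scale_map map_ out) := by unfold Spec_scale_map; infer_instance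

-- ===== CLAIM (what is proved, stated in full; the proofs are below) =====
def Claim_equal_scale_map : Prop := ∀ (map_ : List String), Dom_scale_map map_ → Spec_scale_map map_ (scale_map map_)

-- ===== LEMMAS AND PROOFS =====

-- single-char replace is a per-character flatMap
theorem replace_go_single (o : Char) (new : List Char) :
    ∀ (l acc : List Char) (fuel : Nat), l.length ≤ fuel →
      PySem.Chars.replace.go [o] new fuel l acc
        = acc.reverse ++ l.flatMap (fun c => if c = o then new else [c]) := by
  intro l
  induction l with
  | nil =>
      intro acc fuel _
      cases fuel <;> simp [PySem.Chars.replace.go]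
  | cons c t ih =>
      intro acc fuel hf
      cases fuel with
      | zero => simp at hf
      | succ n =>
        simp only [PySem.Chars.replace.go]
        by_cases h : c = o
        · subst h
          simp only [List.isPrefixOf, List.flatMap_cons]
          rw [if_pos (by simp)]
          simp only [List.length_singleton, List.drop_succ_cons, List.drop_zero]
          rw [ih _ n (by simpa using hf)]
          simp
        · simp only [List.isPrefixOf]
          rw [if_neg (by simp [beq_iff_eq]; intro he; exact h he.symm),
              ih _ n (by simpa using hf)]
          simp [h]

theorem replace_single (s : List Char) (o : Char) (new : List Char) :
    PySem.Chars.replace s [o] new = s.flatMap (fun c => if c = o then new else [c]) := by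
  simp [PySem.Chars.replace, replace_go_single o new s [] s.length (le_refl _)]

theorem join_nil_flatten (xs : List (List Char)) :
    PySem.Chars.join [] xs = xs.flatten := by
  simp only [PySem.Chars.join, List.intercalate]
  induction xs with
  | nil => simp
  | cons a t ih => cases t <;> simp_all [List.intersperse]

-- one character through the four replaces equals one table lookup
theorem char_eq (c : Char) :
    (List.flatMap (fun x => List.flatMap (fun x =>
        List.flatMap (fun x => if x = '@' then "@.".toList else [x])
          (if x = 'O' then "[]".toList else [x]))
        (if x = '.' then "..".toList else [x]))
      (if c = '#' then "##".toList else [c]))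
    = (pvTable.getD c (String.ofList [c])).toList := by
  by_cases h1 : c = '#'
  · subst h1; decide
  · by_cases h2 : c = '.'
    · subst h2; decide
    · by_cases h3 : c = 'O'
      · subst h3; decide
      · by_cases h4 : c = '@'
        · subst h4; decide
        · simp only [if_neg h1, if_neg h2, if_neg h3, if_neg h4, List.flatMap_cons,
            List.flatMap_nil, List.append_nil, pvTable, PySem.Dict.getD, PySem.Dict.get?]
          have b1 : (('#' : Char) == c) = false := by
            simpa [beq_eq_false_iff_ne] using fun h => h1 h.symm
          have b2 : (('.' : Char) == c) = false := by
            simpa [beq_eq_false_iff_ne] using fun h => h2 h.symm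
          have b3 : (('O' : Char) == c) = false := by
            simpa [beq_eq_false_iff_ne] using fun h => h3 h.symm
          have b4 : (('@' : Char) == c) = false := by
            simpa [beq_eq_false_iff_ne] using fun h => h4 h.symm
          simp [List.find?, b1, b2, b3, b4]

-- row-level equality: the chained replaces equal the single table-driven pass
theorem row_eq (row : String) :
    PySem.Str.replace (PySem.Str.replace (PySem.Str.replace (PySem.Str.replace
      row "#" "##") "." "..") "O" "[]") "@" "@."
      = PySem.Str.join "" (row.toList.map (fun c => pvTable.getD c (String.ofList [c]))) := by
  simp only [PySem.Str.replace, PySem.Str.join, String.toList_ofList]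
  have h1 : "#".toList = ['#'] := rfl
  have h2 : ".".toList = ['.'] := rfl
  have h3 : "O".toList = ['O'] := rfl
  have h4 : "@".toList = ['@'] := rfl
  have h0 : "".toList = [] := rfl
  rw [h1, h2, h3, h4, h0]
  rw [replace_single, replace_single, replace_single, replace_single]
  congr 1
  rw [List.flatMap_assoc, List.flatMap_assoc, List.flatMap_assoc,
      join_nil_flatten, List.map_map, ← List.flatMap_def]
  exact List.flatMap_congr (fun c _ => char_eq c)

-- ===== VERDICT (by name: the statement is the Claim_ definition above) =====
theorem scale_map_spec : Claim_equal_scale_map := by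
  intro map_ _
  show _ = _
  unfold scale_map scale_map_alt
  rw [show ∀ (l : List String) (acc : List String),
        l.foldl (fun new_map row => new_map ++ [PySem.Str.replace (PySem.Str.replace
          (PySem.Str.replace (PySem.Str.replace row "#" "##") "." "..") "O" "[]") "@" "@."]) acc
        = acc ++ l.map (fun row =>
            PySem.Str.join "" (row.toList.map (fun c => pvTable.getD c (String.ofList [c]))))
      from ?_]
  · simp
  · intro l
    induction l with
    | nil => simp
    | cons r t ih => intro acc; simp [ih, row_eq r]
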